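-- pv_equiv track=rewrite | github.com/exe-quiel/decision-variable-discreta | utils.py | calcular_maximax
-- ===== SOURCE A (Python) =====
-- def calcular_valores_max_fila(matriz):
--     '''
--     Recibe una matriz y devuelve una lista que contiene los valores máximos de cada fila
--     '''
--     #return [max(matriz[i]) for i in len(matriz)]
--     mayores = []
--     for i in range(len(matriz)):
--         mayores.append(max(matriz[i]))
--     return mayores
--
-- def calcular_maximax(matriz):
--     '''
--     Recibe una matriz, obtiene los valores máximos de cada fila y devuelve el máximo de esos valores
--     '''
--     valores_max = calcular_valores_max_fila(matriz)
--     mayor = valores_max[0]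
--     #y_mayores = []
--     y_mayores = []
--     for y in range(len(valores_max)):
--         if valores_max[y] > mayor:
--             mayor = valores_max[y]
--             y_mayores.clear()
--             y_mayores.append(y)
--         elif valores_max[y] == mayor:
--             y_mayores.append(y)
--
--     celdas_mayores = []
--     for y in range(len(matriz)):
--         for x in range(len(matriz[y])):
--             if matriz[y][x] == mayor:
--                 celdas_mayores.append((x, y))
--
--     # valores máximos de cada fila, valor maximax, filas con el valor maximax, celdas de la matriz original con el valor maximax
--     return valores_max, mayor, y_mayores, celdas_mayores
-- ===== SOURCE B (Python) =====
-- def calcular_maximax(matriz):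
--     '''
--     Recibe una matriz, obtiene los valores maximos de cada fila y devuelve el maximo de esos valores
--     '''
--     valores_max = [max(fila) for fila in matriz]
--     mayor = max(valores_max)
--     y_mayores = []
--     celdas_mayores = []
--     for y, fila in enumerate(matriz):
--         encontrada = False
--         for x, v in enumerate(fila):
--             if v == mayor:
--                 celdas_mayores.append((x, y))
--                 encontrada = True
--         if encontrada:
--             y_mayores.append(y)
--     return valores_max, mayor, y_mayores, celdas_mayores
-- ===== Notes on version B (the rewrite author's own statement) =====
-- stated objective: simpler
-- what changed: Row maxima and the global max come from builtin max instead of the helper loop and the running-max-with-clear pass; y_mayores is derived from the single cell scan (a row is recorded when it yields a matching cell), collapsing A's three passes into a comprehension, one max call and one scan.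
-- outside the precondition, e.g. on calcular_maximax([]): A raises IndexError, B raises ValueError; on calcular_maximax([[1], []]): A raises ValueError, B raises ValueError
import Mathlib
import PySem

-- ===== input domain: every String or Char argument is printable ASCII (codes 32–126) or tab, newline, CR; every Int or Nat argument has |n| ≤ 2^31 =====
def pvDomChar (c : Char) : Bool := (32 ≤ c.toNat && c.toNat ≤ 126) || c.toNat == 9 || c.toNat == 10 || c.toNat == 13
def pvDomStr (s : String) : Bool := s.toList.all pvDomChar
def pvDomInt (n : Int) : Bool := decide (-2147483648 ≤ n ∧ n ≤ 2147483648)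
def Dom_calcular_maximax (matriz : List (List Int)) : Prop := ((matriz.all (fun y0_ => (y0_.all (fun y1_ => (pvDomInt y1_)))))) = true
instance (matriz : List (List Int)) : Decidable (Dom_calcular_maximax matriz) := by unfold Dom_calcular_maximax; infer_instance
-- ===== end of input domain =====

-- B computes the row maxima / global max with builtin max and derives y_mayores from the
-- single cell scan, collapsing A's three passes into one scan (objective: simpler).


-- ===== PORT A =====
def calcular_valores_max_fila (matriz : List (List Int)) : List Int :=
  (PySem.List.pyRange 0 (matriz.length : Int) 1).foldl
    (fun mayores i =>
      mayores ++ [(PySem.List.max? (PySem.List.pyGetD matriz i []) (fun v => v)).getD 0]) []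

def calcular_maximax (matriz : List (List Int)) : List Int × Int × List Int × (List (Int × Int)) :=
  let valores_max := calcular_valores_max_fila matriz
  -- valores_max[0] : IndexError on an empty matrix is excluded by Pre_
  let mayor0 := PySem.List.pyGetD valores_max 0 0
  let s := (PySem.List.pyRange 0 (valores_max.length : Int) 1).foldl
    (fun (s : Int × List Int) y =>
      if s.1 < PySem.List.pyGetD valores_max y 0 then
        (PySem.List.pyGetD valores_max y 0, [y])
      else if PySem.List.pyGetD valores_max y 0 = s.1 then
        (s.1, s.2 ++ [y])
      else s) (mayor0, [])
  let celdas := (PySem.List.pyRange 0 (matriz.length : Int) 1).foldl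
    (fun cs y =>
      (PySem.List.pyRange 0 ((PySem.List.pyGetD matriz y []).length : Int) 1).foldl
        (fun cs x =>
          if PySem.List.pyGetD (PySem.List.pyGetD matriz y []) x 0 = s.1 then cs ++ [(x, y)]
          else cs) cs) []
  (valores_max, s.1, s.2, celdas)

-- ===== PORT B =====
def pvRowMax (fila : List Int) : Int := (PySem.List.max? fila (fun v => v)).getD 0

def calcular_maximax_alt (matriz : List (List Int)) : List Int × Int × List Int × (List (Int × Int)) :=
  let valores_max := matriz.map pvRowMax
  let mayor := (PySem.List.max? valores_max (fun v => v)).getD 0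
  let s := (PySem.List.enumerate matriz 0).foldl
    (fun (st : List Int × List (Int × Int)) p =>
      let inner := (PySem.List.enumerate p.2 0).foldl
        (fun (t : List (Int × Int) × Bool) q =>
          if q.2 = mayor then (t.1 ++ [(q.1, p.1)], true) else t) (st.2, false)
      (if inner.2 then st.1 ++ [p.1] else st.1, inner.1)) ([], [])
  (valores_max, mayor, s.1, s.2)

-- ===== PRECONDITION & SPEC =====
-- Pre_ excludes exactly the inputs on which A raises: the empty matrix (IndexError on
-- valores_max[0]) and matrices with an empty row (ValueError from max([])).
def Pre_calcular_maximax (matriz : List (List Int)) : Prop :=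
  matriz ≠ [] ∧ ∀ fila ∈ matriz, fila ≠ []
instance (matriz : List (List Int)) : Decidable (Pre_calcular_maximax matriz) := by
  unfold Pre_calcular_maximax; infer_instance
def pvWitness_calcular_maximax : List (List Int) := [[1, 3], [2, 3]]

def Spec_calcular_maximax (matriz : List (List Int)) (out : List Int × Int × List Int × (List (Int × Int))) : Prop := out = calcular_maximax_alt matriz
instance (matriz : List (List Int)) (out : List Int × Int × List Int × (List (Int × Int))) : Decidable (Spec_calcular_maximax matriz out) := by unfold Spec_calcular_maximax; infer_instance

-- ===== CLAIM (what is proved, stated in full; the proofs are below) =====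
def Claim_equal_calcular_maximax : Prop := ∀ (matriz : List (List Int)), Dom_calcular_maximax matriz → Pre_calcular_maximax matriz → Spec_calcular_maximax matriz (calcular_maximax matriz)

-- ===== LEMMAS AND PROOFS =====

-- A's helper builds exactly the list of row maxima.
theorem pv_vm_eq (matriz : List (List Int)) :
    calcular_valores_max_fila matriz = matriz.map pvRowMax := by
  unfold calcular_valores_max_fila
  rw [PySem.List.foldl_pyRange_zero_pyGetD' matriz []
        (fun acc fila => acc ++ [(PySem.List.max? fila (fun v => v)).getD 0]) []]
  simpa [pvRowMax] using
    PySem.List.foldl_append_singleton_eq_map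
      (fun fila => (PySem.List.max? fila (fun v : Int => v)).getD 0) matriz []

theorem pv_enumerate_map {α β : Type} (f : α → β) (l : List α) : ∀ (s : Int),
    PySem.List.enumerate (l.map f) s
      = (PySem.List.enumerate l s).map (fun p => (p.1, f p.2)) := by
  induction l with
  | nil => intro s; simp [PySem.List.enumerate_nil]
  | cons a t ih => intro s; simp [PySem.List.enumerate_cons, ih]

theorem pv_any_enumerate {α : Type} (l : List α) (s : Int) (p : α → Bool) :
    (PySem.List.enumerate l s).any (fun q => p q.2) = l.any p := by
  conv_rhs => rw [← PySem.List.map_snd_enumerate l s]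
  rw [List.any_map]
  rfl

-- invariant of A's running-max-with-clear loop
theorem pv_loop1_inv (l : List (Int × Int)) : ∀ (mayor : Int) (ys : List Int),
    l.foldl (fun s p =>
        if s.1 < p.2 then (p.2, [p.1])
        else if p.2 = s.1 then (s.1, s.2 ++ [p.1]) else s) (mayor, ys)
      = (l.foldl (fun a p => max a p.2) mayor,
         (if l.foldl (fun a p => max a p.2) mayor = mayor then ys else []) ++
           (l.filter (fun p => p.2 = l.foldl (fun a p => max a p.2) mayor)).map
             (fun p => p.1)) := by
  induction l with
  | nil => intro mayor ys; simp
  | cons p t ih =>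
    intro mayor ys
    have hmono := (PySem.List.le_foldl_max_int t (fun q => q.2) (max mayor p.2)).1
    by_cases h1 : mayor < p.2
    · have hmax : max mayor p.2 = p.2 := max_eq_right (le_of_lt h1)
      have hgt : ¬ (t.foldl (fun a q => max a q.2) p.2 = mayor) := by
        intro hc; rw [hmax] at hmono; omega
      simp only [List.foldl_cons, if_pos h1, ih, hmax, List.filter_cons]
      by_cases h2 : p.2 = t.foldl (fun a q => max a q.2) p.2
      · simp [← h2]
        intro hc; exact absurd hc (by omega)
      · simp [h2, hgt, Ne.symm h2]
    · by_cases h2 : p.2 = mayor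
      · have hmax : max mayor p.2 = mayor := max_eq_left (le_of_eq h2)
        simp only [List.foldl_cons, if_neg h1, if_pos h2, ih, hmax, List.filter_cons]
        by_cases h3 : t.foldl (fun a q => max a q.2) mayor = mayor
        · simp [h3, h2]
        · have hne : ¬ (p.2 = t.foldl (fun a q => max a q.2) mayor) := by
            rw [h2]; exact fun hc => h3 hc.symm
          simp [h3, hne]
      · have hlt : p.2 < mayor := by
          rcases lt_trichotomy p.2 mayor with h | h | h
          · exact h
          · exact absurd h h2
          · exact absurd h h1
        have hmax : max mayor p.2 = mayor := max_eq_left (le_of_lt hlt)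
        have hne : ¬ (p.2 = t.foldl (fun a q => max a q.2) mayor) := by
          have := (PySem.List.le_foldl_max_int t (fun q => q.2) mayor).1
          omega
        simp only [List.foldl_cons, if_neg h1, if_neg h2, ih, hmax, List.filter_cons]
        simp [hne]

-- invariant of B's inner cell scan over one row
theorem pv_inner_inv (M yy : Int) (l : List (Int × Int)) : ∀ (cs : List (Int × Int)) (b : Bool),
    l.foldl (fun t q => if q.2 = M then (t.1 ++ [(q.1, yy)], true) else t) (cs, b)
      = (cs ++ (l.filter (fun q => q.2 = M)).map (fun q => (q.1, yy)),
         b || l.any (fun q => q.2 = M)) := by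
  induction l with
  | nil => intro cs b; simp
  | cons q t ih =>
    intro cs b
    by_cases h : q.2 = M
    · simp [List.foldl_cons, h, ih, List.filter_cons]
    · simp [List.foldl_cons, h, ih, List.filter_cons]

-- invariant of B's outer scan
theorem pv_outer_inv (M : Int) (rows : List (List Int)) :
    ∀ (s : Int) (ys : List Int) (cs : List (Int × Int)),
    (PySem.List.enumerate rows s).foldl
        (fun st p =>
          let inner := (PySem.List.enumerate p.2 0).foldl
            (fun (t : List (Int × Int) × Bool) q =>
              if q.2 = M then (t.1 ++ [(q.1, p.1)], true) else t) (st.2, false)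
          (if inner.2 then st.1 ++ [p.1] else st.1, inner.1)) (ys, cs)
      = (ys ++ ((PySem.List.enumerate rows s).filter
                  (fun p => p.2.any (fun v => v = M))).map (fun p => p.1),
         cs ++ (PySem.List.enumerate rows s).flatMap
                 (fun p => ((PySem.List.enumerate p.2 0).filter
                              (fun q => q.2 = M)).map (fun q => (q.1, p.1)))) := by
  induction rows with
  | nil => intro s ys cs; simp [PySem.List.enumerate_nil]
  | cons fila t ih =>
    intro s ys cs
    rw [PySem.List.enumerate_cons]
    simp only [List.foldl_cons, pv_inner_inv M s (PySem.List.enumerate fila 0) cs false,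
      Bool.false_or, List.filter_cons, List.flatMap_cons]
    rw [pv_any_enumerate fila 0 (fun v => v = M), ih]
    by_cases h : fila.any (fun v => v = M) = true
    · simp [h, List.append_assoc]
    · simp [h, List.append_assoc]

-- A's first loop over range(len(vm)) is the same fold over enumerate(vm)
theorem pv_loop1_range (vm : List Int) (m0 : Int) :
    (PySem.List.pyRange 0 (vm.length : Int) 1).foldl
        (fun (s : Int × List Int) y =>
          if s.1 < PySem.List.pyGetD vm y 0 then (PySem.List.pyGetD vm y 0, [y])
          else if PySem.List.pyGetD vm y 0 = s.1 then (s.1, s.2 ++ [y]) else s) (m0, [])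
      = (PySem.List.enumerate vm 0).foldl
          (fun (s : Int × List Int) p =>
            if s.1 < p.2 then (p.2, [p.1])
            else if p.2 = s.1 then (s.1, s.2 ++ [p.1]) else s) (m0, []) := by
  rw [PySem.List.enumerate_eq_map_pyRange vm 0, List.foldl_map]
  simp [PySem.List.len]

-- A's outer cell loop over range(len(matriz)) is the same fold over enumerate(matriz)
theorem pv_cells_range (matriz : List (List Int)) (M : Int) :
    (PySem.List.pyRange 0 (matriz.length : Int) 1).foldl
        (fun (cs : List (Int × Int)) y =>
          (PySem.List.pyRange 0 ((PySem.List.pyGetD matriz y []).length : Int) 1).foldl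
            (fun cs x =>
              if PySem.List.pyGetD (PySem.List.pyGetD matriz y []) x 0 = M then cs ++ [(x, y)]
              else cs) cs) []
      = (PySem.List.enumerate matriz 0).foldl
          (fun (cs : List (Int × Int)) p =>
            (PySem.List.pyRange 0 (p.2.length : Int) 1).foldl
              (fun cs x =>
                if PySem.List.pyGetD p.2 x 0 = M then cs ++ [(x, p.1)] else cs) cs) [] := by
  rw [PySem.List.enumerate_eq_map_pyRange matriz [], List.foldl_map]
  simp [PySem.List.len]

-- A's inner cell loop over one row appends exactly the matching cells
theorem pv_cells_inner (fila : List Int) (yy M : Int) (cs : List (Int × Int)) :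
    (PySem.List.pyRange 0 (fila.length : Int) 1).foldl
        (fun cs x => if PySem.List.pyGetD fila x 0 = M then cs ++ [(x, yy)] else cs) cs
      = cs ++ ((PySem.List.enumerate fila 0).filter (fun q => q.2 = M)).map
                (fun q => (q.1, yy)) := by
  have h1 : (PySem.List.pyRange 0 (fila.length : Int) 1).foldl
        (fun cs x => if PySem.List.pyGetD fila x 0 = M then cs ++ [(x, yy)] else cs) cs
      = (PySem.List.enumerate fila 0).foldl
          (fun cs (q : Int × Int) => if q.2 = M then cs ++ [(q.1, yy)] else cs) cs := by
    rw [PySem.List.enumerate_eq_map_pyRange fila 0, List.foldl_map]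
    simp [PySem.List.len]
  rw [h1]
  simpa using PySem.List.foldl_append_if (fun q : Int × Int => decide (q.2 = M))
    (fun q : Int × Int => (q.1, yy)) (PySem.List.enumerate fila 0) cs

-- on a nonempty row of the matrix, the row max equals M iff the row contains M
theorem pv_pred_iff (matriz : List (List Int)) (hne : matriz ≠ [])
    (M : Int) (hM : M = (PySem.List.max? (matriz.map pvRowMax) (fun v => v)).getD 0)
    (row : List Int) (hrow : row ∈ matriz) (hrne : row ≠ []) :
    (pvRowMax row = M) ↔ row.any (fun v => v = M) = true := by
  obtain ⟨a, rt, rfl⟩ := List.exists_cons_of_ne_nil hrne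
  have hmax : PySem.List.max? (a :: rt) (fun v : Int => v) = some (rt.foldl max a) :=
    PySem.List.max?_id_cons a rt
  have hrmax : pvRowMax (a :: rt) = rt.foldl max a := by simp [pvRowMax, hmax]
  have hmem : rt.foldl max a ∈ (a :: rt) := PySem.List.max?_mem hmax
  have hub : ∀ v ∈ (a :: rt), v ≤ rt.foldl max a := PySem.List.max?_isMax hmax
  obtain ⟨b, vt, hvm⟩ := List.exists_cons_of_ne_nil
    (show matriz.map pvRowMax ≠ [] by simp [hne])
  have hMv : PySem.List.max? (matriz.map pvRowMax) (fun v : Int => v)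
      = some (vt.foldl max b) := by rw [hvm]; exact PySem.List.max?_id_cons b vt
  have hrow_le : pvRowMax (a :: rt) ≤ M := by
    have h := PySem.List.max?_isMax hMv (pvRowMax (a :: rt))
      (List.mem_map_of_mem hrow)
    have : M = vt.foldl max b := by simp [hM, hMv]
    omega
  constructor
  · intro h
    rw [List.any_eq_true]
    exact ⟨rt.foldl max a, hmem, by simp [← hrmax, h]⟩
  · intro h
    rw [List.any_eq_true] at h
    obtain ⟨v, hv, hveq⟩ := h
    have hveq : v = M := by simpa using hveq
    have h1 : M ≤ rt.foldl max a := hveq ▸ hub v hv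
    have h2 : rt.foldl max a ≤ M := hrmax ▸ hrow_le
    rw [hrmax]; omega

-- the global max: A's running max over vm starting at vm[0] equals B's max(vm)
theorem pv_mayor_eq (vm : List Int) (hne : vm ≠ []) :
    (PySem.List.enumerate vm 0).foldl (fun a p => max a p.2) (PySem.List.pyGetD vm 0 0)
      = (PySem.List.max? vm (fun v => v)).getD 0 := by
  obtain ⟨b, vt, rfl⟩ := List.exists_cons_of_ne_nil hne
  have hm0 : PySem.List.pyGetD (b :: vt) 0 0 = b := by
    simp [PySem.List.pyGetD, PySem.List.pyGet?, PySem.List.pyIdx?]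
  have hfold : ∀ (init : Int), (PySem.List.enumerate (b :: vt) 0).foldl (fun a p => max a p.2)
      init = (b :: vt).foldl max init := by
    intro init
    conv_rhs => rw [← PySem.List.map_snd_enumerate (b :: vt) 0]
    rw [List.foldl_map]
  rw [hfold, hm0, PySem.List.max?_id_cons]
  simp [List.foldl_cons]

-- ===== VERDICT (by name: the statement is the Claim_ definition above) =====
theorem calcular_maximax_spec : Claim_equal_calcular_maximax := by
  intro matriz _ hpre
  obtain ⟨hne, hrows⟩ := hpre
  unfold Spec_calcular_maximax
  have hvmne : matriz.map pvRowMax ≠ [] := by simp [hne]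
  -- B's value
  have hB : calcular_maximax_alt matriz
      = (matriz.map pvRowMax,
         (PySem.List.max? (matriz.map pvRowMax) (fun v => v)).getD 0,
         ((PySem.List.enumerate matriz 0).filter
             (fun p => p.2.any (fun v => v = (PySem.List.max? (matriz.map pvRowMax) (fun v => v)).getD 0))).map
           (fun p => p.1),
         (PySem.List.enumerate matriz 0).flatMap
           (fun p => ((PySem.List.enumerate p.2 0).filter
               (fun q => q.2 = (PySem.List.max? (matriz.map pvRowMax) (fun v => v)).getD 0)).map
             (fun q => (q.1, p.1)))) := by
    simp only [calcular_maximax_alt]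
    rw [pv_outer_inv]
    simp
  -- A's value
  have hA : calcular_maximax matriz
      = (matriz.map pvRowMax,
         (PySem.List.max? (matriz.map pvRowMax) (fun v => v)).getD 0,
         ((PySem.List.enumerate (matriz.map pvRowMax) 0).filter
             (fun p => p.2 = (PySem.List.max? (matriz.map pvRowMax) (fun v => v)).getD 0)).map
           (fun p => p.1),
         (PySem.List.enumerate matriz 0).flatMap
           (fun p => ((PySem.List.enumerate p.2 0).filter
               (fun q => q.2 = (PySem.List.max? (matriz.map pvRowMax) (fun v => v)).getD 0)).map
             (fun q => (q.1, p.1)))) := by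
    simp only [calcular_maximax, pv_vm_eq]
    rw [pv_loop1_range, pv_loop1_inv, pv_mayor_eq _ hvmne]
    simp only [ite_self, List.nil_append]
    rw [pv_cells_range]
    simp only [pv_cells_inner]
    rw [PySem.List.foldl_append_eq_flatMap]
    simp
  rw [hA, hB]
  -- remaining: A's y_mayores (filter on the row maxima) = B's (rows yielding a match)
  refine congrArg (fun l => (matriz.map pvRowMax,
    (PySem.List.max? (matriz.map pvRowMax) (fun v => v)).getD 0, l,
    (PySem.List.enumerate matriz 0).flatMap
      (fun p => ((PySem.List.enumerate p.2 0).filter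
          (fun q => q.2 = (PySem.List.max? (matriz.map pvRowMax) (fun v => v)).getD 0)).map
        (fun q => (q.1, p.1))))) ?_
  rw [pv_enumerate_map pvRowMax matriz 0, List.filter_map, List.map_map]
  congr 1
  apply List.filter_congr
  intro p hp
  have hmem : p.2 ∈ matriz := by
    have h := PySem.List.map_snd_enumerate matriz 0
    have : p.2 ∈ (PySem.List.enumerate matriz 0).map (fun x => x.2) :=
      List.mem_map_of_mem hp
    rwa [h] at this
  have hiff := pv_pred_iff matriz hne _ rfl p.2 hmem (hrows p.2 hmem)
  by_cases h : pvRowMax p.2 = (PySem.List.max? (matriz.map pvRowMax) (fun v => v)).getD 0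
  · simp [Function.comp, h, hiff.mp h]
  · have hno : ¬ (p.2.any (fun v => v = (PySem.List.max? (matriz.map pvRowMax) (fun v => v)).getD 0) = true) :=
      fun hc => h (hiff.mpr hc)
    simp [Function.comp, h, hno]
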